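-- pv_equiv track=rewrite | github.com/FernandoBarrz/python-work-out-exercises | lists-and-tuples/exercise-12/exercise-12.py | most_repeating_word
-- ===== SOURCE A (Python) =====
-- from collections import Counter
--
-- def most_repeating_word(sequence_to_count):
--     '''
--     Return the string that contains the greatest number of repeated letters.
--     '''
--     output = ''
--     max_count = 1
--     for element in sequence_to_count:
--         temp_var = Counter(element).most_common(1)[0][1]
--         if temp_var >= max_count:
--             max_count = temp_var
--             output = element
--     return output
-- ===== SOURCE B (Python) =====
-- from collections import Counter
--
-- def most_repeating_word(sequence_to_count):
--     '''
--     Return the string that contains the greatest number of repeated letters.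
--     '''
--     if not sequence_to_count:
--         return ''
--     scores = [Counter(word).most_common(1)[0][1] for word in sequence_to_count]
--     best = max(scores)
--     last_index = len(scores) - 1 - scores[::-1].index(best)
--     return sequence_to_count[last_index]
-- ===== Notes on version B (the rewrite author's own statement) =====
-- stated objective: alternative
-- what changed: A's single running (output, max_count) accumulator loop is replaced by staged passes over precomputed data: build the list of per-word max letter counts, take its maximum, locate the LAST position attaining it via scores[::-1].index, and return that word by index; last-position lookup realises A's >= (last-wins) tie rule.
import Mathlib
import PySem

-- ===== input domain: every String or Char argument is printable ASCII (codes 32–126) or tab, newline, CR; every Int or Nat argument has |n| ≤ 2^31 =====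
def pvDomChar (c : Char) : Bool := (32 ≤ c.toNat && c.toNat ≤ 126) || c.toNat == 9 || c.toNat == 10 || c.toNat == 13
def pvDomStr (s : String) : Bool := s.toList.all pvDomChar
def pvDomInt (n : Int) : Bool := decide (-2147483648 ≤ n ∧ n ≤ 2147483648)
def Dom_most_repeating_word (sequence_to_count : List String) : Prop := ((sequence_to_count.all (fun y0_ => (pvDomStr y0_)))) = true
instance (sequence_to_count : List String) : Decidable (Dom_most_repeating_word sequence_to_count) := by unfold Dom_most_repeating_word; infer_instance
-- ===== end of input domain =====

-- B replaces A's running (output, max_count) accumulator loop by staged passes: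
-- score list, its maximum, last index attaining it, then an indexed lookup (alternative; same cost).

-- ===== PORT A =====
-- Counter(w).most_common(1)[0][1]: the count of a maximal-count item of Counter(w).
-- On w = "" Python raises IndexError (those inputs are excluded by Pre_); the helper is made
-- total with .getD 0 there, a value neither port's claimed behaviour depends on.
def mcCount (w : String) : Int :=
  (Option.map (fun p => p.2)
    (PySem.List.max? (PySem.Dict.counter w.toList).items (fun p : Char × Int => p.2))).getD 0

def most_repeating_word (sequence_to_count : List String) : String :=
  (sequence_to_count.foldl
    (fun (st : String × Int) element =>
      let temp_var := mcCount element
      if st.2 ≤ temp_var then (element, temp_var) else st)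
    ("", 1)).1

-- ===== PORT B =====
-- Source B: guard empty; scores = [Counter(w).most_common(1)[0][1] for w in seq];
--       best = max(scores); last = len(scores) - 1 - scores[::-1].index(best); return seq[last]
def most_repeating_word_alt (sequence_to_count : List String) : String :=
  match sequence_to_count with
  | [] => ""
  | _ :: _ =>
    let scores := sequence_to_count.map mcCount
    match PySem.List.max? scores (fun v => v) with
    | none => ""   -- unreachable: scores is nonempty
    | some best =>
      match PySem.List.index? scores.reverse best with
      | none => ""   -- unreachable: best ∈ scores
      | some i =>
        let last_index : Int := (scores.length : Int) - 1 - (i : Int)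
        (PySem.List.pyGet? sequence_to_count last_index).getD ""   -- in range: unreachable default

-- ===== PRECONDITION & SPEC =====
-- Pre_ excludes lists containing the empty string: on those A (and B) raise IndexError
-- from Counter('').most_common(1)[0].
def Pre_most_repeating_word (sequence_to_count : List String) : Prop :=
  "" ∉ sequence_to_count
instance (sequence_to_count : List String) : Decidable (Pre_most_repeating_word sequence_to_count) := by
  unfold Pre_most_repeating_word; infer_instance

def pvWitness_most_repeating_word : List String := ["ab", "aa", "cc"]

def Spec_most_repeating_word (sequence_to_count : List String) (out : String) : Prop :=
  out = most_repeating_word_alt sequence_to_count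
instance (sequence_to_count : List String) (out : String) : Decidable (Spec_most_repeating_word sequence_to_count out) := by
  unfold Spec_most_repeating_word; infer_instance

-- ===== CLAIM (what is proved, stated in full; the proofs are below) =====
def Claim_equal_most_repeating_word : Prop := ∀ (sequence_to_count : List String), Dom_most_repeating_word sequence_to_count → Pre_most_repeating_word sequence_to_count → Spec_most_repeating_word sequence_to_count (most_repeating_word sequence_to_count)

-- ===== LEMMAS AND PROOFS =====

-- The LAST word attaining the maximal score, as structural recursion on the list.
def lastArgmax : List String → String
  | [] => ""
  | [x] => x
  | x :: y :: t => if mcCount (lastArgmax (y :: t)) < mcCount x then x else lastArgmax (y :: t)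

theorem mcCount_pos (w : String) (hw : w ≠ "") : 1 ≤ mcCount w := by
  have hne : (PySem.Dict.counter w.toList).items ≠ [] := by
    rw [PySem.Dict.items_counter]
    simp only [ne_eq, List.map_eq_nil_iff]
    intro h
    apply hw
    have : w.toList = [] := by
      by_contra hnil
      rcases List.exists_mem_of_ne_nil _ hnil with ⟨c, hc⟩
      have : c ∈ PySem.Set.ofList w.toList := (PySem.Set.mem_ofList _ _).mpr hc
      simp [h] at this
    exact String.toList_inj.mp (by simpa using this)
  rcases hm : PySem.List.max? (PySem.Dict.counter w.toList).items (fun p : Char × Int => p.2) with _ | p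
  · exact absurd ((PySem.List.max?_eq_none_iff _ _).mp hm) hne
  · have hp := PySem.List.max?_mem hm
    rw [PySem.Dict.items_counter] at hp
    rcases List.mem_map.mp hp with ⟨k, hk, hkp⟩
    have hkmem : k ∈ w.toList := (PySem.Set.mem_ofList _ _).mp hk
    have hc : 1 ≤ List.count k w.toList := List.one_le_count_iff.mpr hkmem
    have hp2 : p.2 = (List.count k w.toList : Int) := by rw [← hkp]
    have : (1 : Int) ≤ p.2 := by rw [hp2]; exact_mod_cast hc
    simpa [mcCount, hm] using this

-- A's loop, once the state is of the form (w, mcCount w), computes the last argmax as a left fold.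
theorem foldA_eq (t : List String) : ∀ w : String,
    (t.foldl (fun (st : String × Int) element =>
        let temp_var := mcCount element
        if st.2 ≤ temp_var then (element, temp_var) else st) (w, mcCount w))
    = (t.foldl (fun a x => if mcCount a ≤ mcCount x then x else a) w,
       mcCount (t.foldl (fun a x => if mcCount a ≤ mcCount x then x else a) w)) := by
  induction t with
  | nil => intro w; rfl
  | cons y s ih =>
    intro w
    simp only [List.foldl_cons]
    by_cases h : mcCount w ≤ mcCount y
    · simpa [h] using ih y
    · simpa [h] using ih w

theorem mcCount_le_lastArgmax (t : List String) (y : String) :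
    mcCount y ≤ mcCount (lastArgmax (y :: t)) := by
  cases t with
  | nil => simp [lastArgmax]
  | cons z s =>
    simp only [lastArgmax]
    split_ifs with h
    · exact le_refl _
    · omega

-- A's left fold with "≥ update" equals the last argmax.
theorem foldG_eq_lastArgmax (t : List String) : ∀ x : String,
    t.foldl (fun a x => if mcCount a ≤ mcCount x then x else a) x = lastArgmax (x :: t) := by
  induction t with
  | nil => intro x; simp [lastArgmax]
  | cons y s ih =>
    intro x
    simp only [List.foldl_cons]
    by_cases hxy : mcCount x ≤ mcCount y
    · rw [if_pos hxy, ih y]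
      have hM : ¬ mcCount (lastArgmax (y :: s)) < mcCount x := by
        have := mcCount_le_lastArgmax s y; omega
      simp [lastArgmax, hM]
    · rw [if_neg hxy, ih x]
      rw [not_le] at hxy
      cases s with
      | nil => simp [lastArgmax, hxy]
      | cons u v =>
        simp only [lastArgmax]
        by_cases h1 : mcCount (lastArgmax (u :: v)) < mcCount y
        · have h2 : mcCount (lastArgmax (u :: v)) < mcCount x := by omega
          simp [h1, hxy, h2]
        · simp [h1]

-- Structure of the last argmax: it splits the list, everything after it scores strictly
-- less, everything before it scores at most as much.
theorem lastArgmax_decomp (x : String) (t : List String) :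
    ∃ pre suf, x :: t = pre ++ lastArgmax (x :: t) :: suf ∧
      (∀ y ∈ suf, mcCount y < mcCount (lastArgmax (x :: t))) ∧
      (∀ y ∈ pre, mcCount y ≤ mcCount (lastArgmax (x :: t))) := by
  induction t generalizing x with
  | nil => exact ⟨[], [], by simp [lastArgmax], by simp, by simp⟩
  | cons y s ih =>
    obtain ⟨pre, suf, hd, hs, hp⟩ := ih y
    by_cases h : mcCount (lastArgmax (y :: s)) < mcCount x
    · refine ⟨[], y :: s, by simp [lastArgmax, h], ?_, by simp⟩
      intro z hz
      have hz' : mcCount z ≤ mcCount (lastArgmax (y :: s)) := by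
        rw [hd] at hz
        rcases List.mem_append.mp hz with h1 | h1
        · exact hp z h1
        · rcases List.mem_cons.mp h1 with h2 | h2
          · exact le_of_eq (by rw [h2])
          · exact le_of_lt (hs z h2)
      have : lastArgmax (x :: y :: s) = x := by simp [lastArgmax, h]
      rw [this]; omega
    · have hLA : lastArgmax (x :: y :: s) = lastArgmax (y :: s) := by simp [lastArgmax, h]
      refine ⟨x :: pre, suf, ?_, ?_, ?_⟩
      · rw [hLA]; simpa using hd
      · rw [hLA]; exact hs
      · rw [hLA]
        intro z hz
        rcases List.mem_cons.mp hz with h1 | h1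
        · rw [h1]; omega
        · exact hp z h1

-- ===== VERDICT (by name: the statement is the Claim_ definition above) =====
theorem most_repeating_word_spec : Claim_equal_most_repeating_word := by
  intro seq _hdom hpre
  unfold Spec_most_repeating_word
  cases seq with
  | cons x t =>
    have hx1 : 1 ≤ mcCount x := mcCount_pos x (by intro h; exact hpre (h ▸ List.mem_cons_self ..))
    set w := lastArgmax (x :: t) with hw
    have hA : most_repeating_word (x :: t) = w := by
      unfold most_repeating_word
      simp only [List.foldl_cons]
      have hfirst : (if (1 : Int) ≤ mcCount x then (x, mcCount x) else ("", 1)) = (x, mcCount x) := by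
        simp [hx1]
      simp only [hfirst]
      rw [foldA_eq, foldG_eq_lastArgmax]
    obtain ⟨pre, suf, hd, hs, hp⟩ := lastArgmax_decomp x t
    have hwmem : w ∈ x :: t := by rw [hd]; exact List.mem_append.mpr (Or.inr (List.mem_cons_self ..))
    have hmaxall : ∀ y ∈ x :: t, mcCount y ≤ mcCount w := by
      intro y hy
      rw [hd] at hy
      rcases List.mem_append.mp hy with h1 | h1
      · exact hp y h1
      · rcases List.mem_cons.mp h1 with h2 | h2
        · exact le_of_eq (by rw [h2])
        · exact le_of_lt (hs y h2)
    -- the max of the score list is mcCount w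
    rcases hm : PySem.List.max? ((x :: t).map mcCount) (fun v => v) with _ | b
    · exact absurd ((PySem.List.max?_eq_none_iff _ _).mp hm) (by simp)
    have hb_mem := PySem.List.max?_mem hm
    rcases List.mem_map.mp hb_mem with ⟨y, hy, hyb⟩
    have hb_le : b ≤ mcCount w := hyb ▸ hmaxall y hy
    have hw_le : mcCount w ≤ b := PySem.List.max?_isMax hm (mcCount w) (List.mem_map_of_mem hwmem)
    have hbw : b = mcCount w := le_antisymm hb_le hw_le
    -- the last index attaining the max, found from the back
    have hidx : PySem.List.index? (((x :: t).map mcCount).reverse) b = some suf.length := by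
      rw [hbw, hd]
      have hshape : ((pre ++ w :: suf).map mcCount).reverse
          = (suf.reverse.map mcCount) ++ mcCount w :: (pre.reverse.map mcCount) := by
        simp
      rw [hshape]
      refine (PySem.List.index?_eq_some_iff ..).mpr ⟨_, _, rfl, by simp, ?_⟩
      intro hmem
      rcases List.mem_map.mp hmem with ⟨z, hz, hzc⟩
      have hlt := hs z (List.mem_reverse.mp hz)
      rw [← hw] at hlt
      exact absurd hzc (ne_of_lt hlt)
    -- the indexed lookup returns w
    have hlen : (x :: t).length = pre.length + 1 + suf.length := by rw [hd]; simp; omega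
    have hB : most_repeating_word_alt (x :: t) = w := by
      unfold most_repeating_word_alt
      simp only [hm, hidx]
      have hcast : (((x :: t).map mcCount).length : Int) - 1 - (suf.length : Int)
          = ((pre.length : Nat) : Int) := by
        simp only [List.length_map]
        rw [hlen]; push_cast; ring
      rw [hcast]
      have : PySem.List.pyGet? (x :: t) ((pre.length : Nat) : Int) = some w := by
        rw [hd]; exact PySem.List.pyGet?_append_length ..
      rw [this]
      rfl
    rw [hA, hB]
  | nil => rfl
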